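-- pv_equiv track=rewrite | github.com/tanvijshetty1972-lang/resume-analysis-candidate-ranking | utils/projects_extractor.py | extract_projects
-- ===== SOURCE A (Python) =====
-- PROJECT_KEYWORDS = ["project", "internship", "developed", "implemented", "designed", "created", "built", "worked on"]
--
-- def extract_projects(text):
--     lines = text.split("\n")
--     projects = []
--     current_proj = ""
--     for line in lines:
--         if any(k.lower() in line.lower() for k in PROJECT_KEYWORDS):
--             current_proj += line.strip() + " "
--         elif current_proj:
--             projects.append(current_proj.strip())
--             current_proj = ""
--     if current_proj:
--         projects.append(current_proj.strip())
--     return projects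
-- ===== SOURCE B (Python) =====
-- PROJECT_KEYWORDS = ["project", "internship", "developed", "implemented", "designed", "created", "built", "worked on"]
--
-- def _matches(line):
--     low = line.lower()
--     return any(k in low for k in PROJECT_KEYWORDS)
--
-- def extract_projects(text):
--     lines = text.split("\n")
--     projects = []
--     i = 0
--     while i < len(lines):
--         if _matches(lines[i]):
--             j = i + 1
--             while j < len(lines) and _matches(lines[j]):
--                 j += 1
--             projects.append(" ".join(l.strip() for l in lines[i:j]))
--             i = j
--         else:
--             i += 1
--     return projects
-- ===== Notes on version B (the rewrite author's own statement) =====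
-- stated objective: idiomatic
-- what changed: Replaces A's growing string accumulator with a run-splitting scan: B finds each maximal consecutive run of keyword-matching lines and emits the space-joined stripped line texts of the run, lowercasing each line once instead of lowercasing every keyword per line.
import Mathlib
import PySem

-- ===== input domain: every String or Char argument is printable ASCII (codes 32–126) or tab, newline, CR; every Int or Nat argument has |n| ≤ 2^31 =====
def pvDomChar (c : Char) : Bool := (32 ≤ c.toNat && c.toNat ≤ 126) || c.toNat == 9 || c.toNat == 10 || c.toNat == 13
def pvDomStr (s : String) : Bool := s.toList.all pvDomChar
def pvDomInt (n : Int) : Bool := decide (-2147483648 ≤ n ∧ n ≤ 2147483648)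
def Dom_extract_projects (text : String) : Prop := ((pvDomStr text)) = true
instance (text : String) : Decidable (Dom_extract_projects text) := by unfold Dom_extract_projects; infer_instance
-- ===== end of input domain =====

-- B groups maximal consecutive runs of keyword-matching lines and joins each run's stripped
-- lines with " " (lowercasing each line once), instead of A's growing string accumulator;
-- return values proved equal.

-- ===== PORT A =====
def PROJECT_KEYWORDS : List String :=
  ["project", "internship", "developed", "implemented", "designed", "created", "built", "worked on"]

-- Python's str accumulator current_proj is kept as List Char (PySem strings are defined
-- over List Char, so '+=' is exact list append here)
def extract_projects (text : String) : List String :=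
  let lines := (PySem.Str.split? text "\n").getD []
  let st := lines.foldl (fun (st : List String × List Char) line =>
    if PROJECT_KEYWORDS.any (fun k => PySem.Str.isIn (PySem.Str.lower k) (PySem.Str.lower line)) then
      (st.1, st.2 ++ (PySem.Str.strip line).toList ++ [' '])
    else if st.2 ≠ [] then
      (st.1 ++ [String.ofList (PySem.Chars.strip st.2)], [])
    else st) ([], [])
  if st.2 ≠ [] then st.1 ++ [String.ofList (PySem.Chars.strip st.2)] else st.1

-- ===== PORT B =====
def bMatches (line : String) : Bool :=
  let low := PySem.Str.lower line
  PROJECT_KEYWORDS.any (fun k => PySem.Str.isIn k low)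

-- Source B's outer while with the inner run-extending while: takeWhile is the inner
-- 'while j < len(lines) and _matches(lines[j])' scan, dropWhile the advance 'i = j'
def bLoop : List String → List String
  | [] => []
  | l :: rest =>
    if bMatches l then
      PySem.Str.join " " ((l :: rest.takeWhile bMatches).map PySem.Str.strip)
        :: bLoop (rest.dropWhile bMatches)
    else bLoop rest
termination_by lines => lines.length
decreasing_by
  · exact Nat.lt_succ_of_le (List.length_dropWhile_le _ _)
  · exact Nat.lt_succ_self _

def extract_projects_alt (text : String) : List String :=
  bLoop ((PySem.Str.split? text "\n").getD [])

-- ===== PRECONDITION & SPEC =====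
def Spec_extract_projects (text : String) (out : List String) : Prop := out = extract_projects_alt text
instance (text : String) (out : List String) : Decidable (Spec_extract_projects text out) := by unfold Spec_extract_projects; infer_instance

-- ===== CLAIM (what is proved, stated in full; the proofs are below) =====
def Claim_equal_extract_projects : Prop := ∀ (text : String), Dom_extract_projects text → Spec_extract_projects text (extract_projects text)

-- ===== LEMMAS AND PROOFS =====

-- A's loop body and the trailing flush, as named functions
def aStep (st : List String × List Char) (line : String) : List String × List Char :=
  if bMatches line then (st.1, st.2 ++ (PySem.Str.strip line).toList ++ [' '])
  else if st.2 ≠ [] then (st.1 ++ [String.ofList (PySem.Chars.strip st.2)], [])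
  else st

def finishA (st : List String × List Char) : List String :=
  if st.2 ≠ [] then st.1 ++ [String.ofList (PySem.Chars.strip st.2)] else st.1

def stripL (l : String) : List Char := PySem.Chars.strip l.toList

-- A's accumulator after a run with stripped pieces ps: each piece followed by one space
def flatP (ps : List (List Char)) : List Char := (ps.map (· ++ [' '])).flatten

-- B's join of the pieces
def interP (ps : List (List Char)) : List Char := List.intercalate [' '] ps

-- a piece is nonempty and has no whitespace at either end
def Good (p : List Char) : Prop :=
  p ≠ [] ∧ (∀ c, p.head? = some c → PySem.Chars.isspace c = false)
        ∧ (∀ c, p.getLast? = some c → PySem.Chars.isspace c = false)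

theorem lower_kw : PROJECT_KEYWORDS.map PySem.Str.lower = PROJECT_KEYWORDS := by decide

theorem matches_eq (line : String) :
    (PROJECT_KEYWORDS.any (fun k => PySem.Str.isIn (PySem.Str.lower k) (PySem.Str.lower line)))
      = bMatches line := by
  show _ = PROJECT_KEYWORDS.any (fun k => PySem.Str.isIn k (PySem.Str.lower line))
  conv_rhs => rw [← lower_kw, List.any_map]
  rfl

theorem head?_dropWhile {α : Type} (p : α → Bool) (l : List α) (c : α)
    (h : (List.dropWhile p l).head? = some c) : p c = false := by
  induction l with
  | nil => simp at h
  | cons x xs ih =>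
    rw [List.dropWhile_cons] at h
    split at h
    · exact ih h
    · simp at h; subst h; simp_all

theorem head?_of_prefix {α : Type} {l₁ l₂ : List α} {c : α}
    (hp : l₁ <+: l₂) (h : l₁.head? = some c) : l₂.head? = some c := by
  obtain ⟨t, rfl⟩ := hp
  cases l₁ <;> simp_all

theorem rstrip_prefix (t : List Char) : PySem.Chars.rstrip t <+: t := by
  have h := List.dropWhile_suffix (l := t.reverse) PySem.Chars.isspace
  have := (List.reverse_prefix (l₁ := List.dropWhile PySem.Chars.isspace t.reverse)
    (l₂ := t.reverse)).mpr h
  simpa [PySem.Chars.rstrip] using this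

theorem good_strip (s : List Char) (hne : PySem.Chars.strip s ≠ []) :
    Good (PySem.Chars.strip s) := by
  refine ⟨hne, ?_, ?_⟩
  · intro c hc
    have hpre : PySem.Chars.strip s <+: PySem.Chars.lstrip s := by
      simpa [PySem.Chars.strip] using rstrip_prefix (PySem.Chars.lstrip s)
    have := head?_of_prefix hpre hc
    exact head?_dropWhile _ _ _ (by simpa [PySem.Chars.lstrip] using this)
  · intro c hc
    have : (List.dropWhile PySem.Chars.isspace (PySem.Chars.lstrip s).reverse).head? = some c := by
      have := hc
      simp only [PySem.Chars.strip, PySem.Chars.rstrip] at this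
      rwa [List.getLast?_reverse] at this
    exact head?_dropWhile _ _ _ this

theorem strip_ne_nil (s : List Char) (h : ∃ c ∈ s, PySem.Chars.isspace c = false) :
    PySem.Chars.strip s ≠ [] := by
  intro hnil
  obtain ⟨c, hc, hcs⟩ := h
  have h1 : List.dropWhile PySem.Chars.isspace (PySem.Chars.lstrip s).reverse = [] := by
    simpa [PySem.Chars.strip, PySem.Chars.rstrip] using hnil
  have h2 : ∀ x ∈ PySem.Chars.lstrip s, PySem.Chars.isspace x = true := by
    intro x hx
    exact (List.dropWhile_eq_nil_iff.mp h1) x (by simpa using hx)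
  have h3 : ∀ x ∈ s, PySem.Chars.isspace x = true := by
    intro x hx
    rw [← List.takeWhile_append_dropWhile (p := PySem.Chars.isspace) (l := s)] at hx
    rcases List.mem_append.mp hx with h | h
    · exact List.mem_takeWhile_imp h
    · exact h2 x h
  rw [h3 c hc] at hcs; cases hcs

theorem lowerChar_of_isspace (c : Char) (h : PySem.Chars.isspace c = true) :
    PySem.Chars.lowerChar c = c := by
  have hA : ('A' ≤ c) ↔ 65 ≤ c.toNat := by
    rw [Char.le_def, UInt32.le_iff_toNat_le]; rfl
  have hZ : (c ≤ 'Z') ↔ c.toNat ≤ 90 := by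
    rw [Char.le_def, UInt32.le_iff_toNat_le]; rfl
  have hup : PySem.Chars.isupper c = false := by
    simp only [PySem.Chars.isspace, Bool.or_eq_true, Bool.and_eq_true,
      decide_eq_true_eq] at h
    simp only [PySem.Chars.isupper, Bool.and_eq_false_iff,
      decide_eq_false_iff_not, hA, hZ]
    omega
  simp [PySem.Chars.lowerChar, hup]

theorem kw_head_bool :
    PROJECT_KEYWORDS.all (fun k =>
      match k.toList with
      | [] => false
      | h :: _ => !PySem.Chars.isspace h) = true := by decide

theorem matches_nonspace (l : String) (h : bMatches l = true) :
    ∃ c ∈ l.toList, PySem.Chars.isspace c = false := by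
  obtain ⟨k, hk, hin⟩ := List.any_eq_true.mp h
  have hinf : k.toList <:+: (PySem.Str.lower l).toList :=
    (PySem.Str.isIn_iff_infix k (PySem.Str.lower l)).mp hin
  rw [PySem.Str.toList_lower] at hinf
  have hb := List.all_eq_true.mp kw_head_bool k hk
  rcases hh : k.toList with _ | ⟨hd, tl⟩
  · rw [hh] at hb; simp at hb
  · rw [hh] at hb
    have hdns : PySem.Chars.isspace hd = false := by simpa using hb
    have hmem : hd ∈ PySem.Chars.lower l.toList := by
      apply hinf.subset; rw [hh]; simp
    simp only [PySem.Chars.lower, List.mem_map] at hmem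
    obtain ⟨c, hc, hlc⟩ := hmem
    refine ⟨c, hc, ?_⟩
    by_cases hs : PySem.Chars.isspace c = true
    · rw [lowerChar_of_isspace c hs] at hlc; subst hlc; rw [hs] at hdns; cases hdns
    · simpa using hs

theorem good_stripL (l : String) (h : bMatches l = true) : Good (stripL l) :=
  good_strip _ (strip_ne_nil _ (matches_nonspace l h))

theorem intercalate_cons₂ (x y : List Char) (ys : List (List Char)) :
    List.intercalate [' '] (x :: y :: ys) = x ++ [' '] ++ List.intercalate [' '] (y :: ys) := by
  simp [List.intercalate, List.intersperse]

theorem flat_eq : ∀ (ps : List (List Char)) (p : List Char),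
    flatP (p :: ps) = interP (p :: ps) ++ [' '] := by
  intro ps
  induction ps with
  | nil => intro p; simp [flatP, interP, List.intercalate]
  | cons q ps ih =>
    intro p
    show (p ++ [' ']) ++ flatP (q :: ps) = _
    rw [ih q]
    simp only [interP]
    rw [intercalate_cons₂]
    simp

theorem flat_append_singleton (ps : List (List Char)) (x : List Char) :
    flatP (ps ++ [x]) = flatP ps ++ (x ++ [' ']) := by
  simp [flatP]

theorem good_inter : ∀ (ps : List (List Char)) (p : List Char),
    Good p → (∀ q ∈ ps, Good q) → Good (interP (p :: ps)) := by
  intro ps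
  induction ps with
  | nil => intro p hp _; simpa [interP, List.intercalate] using hp
  | cons q ps ih =>
    intro p hp hq
    have hI := ih q (hq q (by simp)) (fun r hr => hq r (by simp [hr]))
    obtain ⟨hne, hh, hl⟩ := hp
    obtain ⟨hne', hh', hl'⟩ := hI
    simp only [interP] at hne' hh' hl' ⊢
    rw [intercalate_cons₂]
    refine ⟨by simp [hne], ?_, ?_⟩
    · intro c hc
      apply hh
      cases p with
      | nil => exact absurd rfl hne
      | cons a t => simpa using hc
    · intro c hc
      apply hl' c
      rw [List.append_assoc, List.getLast?_append_of_ne_nil _ (by simp)] at hc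
      rwa [List.getLast?_append_of_ne_nil _ hne'] at hc

theorem lstrip_eq_self (X : List Char) (c : Char) (h : X.head? = some c)
    (hc : PySem.Chars.isspace c = false) : List.dropWhile PySem.Chars.isspace X = X := by
  cases X with
  | nil => rfl
  | cons a t => simp at h; subst h; simp [hc]

theorem rstrip_append_space (X : List Char) :
    PySem.Chars.rstrip (X ++ [' ']) = PySem.Chars.rstrip X := by
  simp [PySem.Chars.rstrip, show PySem.Chars.isspace ' ' = true from by decide]

theorem rstrip_eq_self (X : List Char) (c : Char) (h : X.getLast? = some c)
    (hc : PySem.Chars.isspace c = false) : PySem.Chars.rstrip X = X := by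
  rw [PySem.Chars.rstrip, lstrip_eq_self X.reverse c (by rwa [List.head?_reverse]) hc,
    List.reverse_reverse]

theorem strip_flat (ps : List (List Char)) (p : List Char)
    (hp : Good p) (hq : ∀ q ∈ ps, Good q) :
    PySem.Chars.strip (flatP (p :: ps)) = interP (p :: ps) := by
  obtain ⟨hne, hh, hl⟩ := good_inter ps p hp hq
  rw [flat_eq]
  obtain ⟨c, hc⟩ := Option.isSome_iff_exists.mp (List.isSome_head?.mpr hne)
  obtain ⟨d, hd⟩ := Option.isSome_iff_exists.mp (List.getLast?_isSome.mpr hne)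
  rw [PySem.Chars.strip, PySem.Chars.lstrip,
    lstrip_eq_self _ c (head?_of_prefix ⟨[' '], rfl⟩ hc) (hh c hc),
    rstrip_append_space, rstrip_eq_self _ d hd (hl d hd)]

theorem join_eq (xs : List String) :
    PySem.Str.join " " (xs.map PySem.Str.strip) = String.ofList (interP (xs.map stripL)) := by
  have hm : List.map (String.toList ∘ PySem.Str.strip) xs = List.map stripL xs :=
    List.map_congr_left (fun x _ => by simp [stripL, PySem.Str.toList_strip])
  simp only [PySem.Str.join, PySem.Chars.join, interP, List.map_map, hm]
  rw [show (" ").toList = [' '] from rfl]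

-- the joint loop invariant: outside a run (accumulator empty) and inside a run
-- (accumulator = the stripped pieces seen so far, each followed by one space)
theorem main_ind : ∀ n, ∀ lines : List String, lines.length ≤ n →
    (∀ acc, finishA (lines.foldl aStep (acc, [])) = acc ++ bLoop lines) ∧
    (∀ (acc : List String) (ps : List (List Char)) (p : List Char),
      Good p → (∀ q ∈ ps, Good q) →
      finishA (lines.foldl aStep (acc, flatP (p :: ps))) =
        acc ++ String.ofList (interP (p :: (ps ++ (lines.takeWhile bMatches).map stripL)))
          :: bLoop (lines.dropWhile bMatches)) := by
  have nil_case :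
      (∀ acc, finishA (([] : List String).foldl aStep (acc, [])) = acc ++ bLoop []) ∧
      (∀ (acc : List String) (ps : List (List Char)) (p : List Char),
        Good p → (∀ q ∈ ps, Good q) →
        finishA (([] : List String).foldl aStep (acc, flatP (p :: ps))) =
          acc ++ String.ofList (interP (p :: (ps ++ (([] : List String).takeWhile bMatches).map stripL)))
            :: bLoop (([] : List String).dropWhile bMatches)) := by
    constructor
    · intro acc; simp [finishA, bLoop]
    · intro acc ps p hp hq
      have hne : flatP (p :: ps) ≠ [] := by rw [flat_eq]; simp
      simp only [List.foldl_nil, finishA, hne, if_pos, ne_eq, not_false_iff]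
      rw [strip_flat ps p hp hq]
      simp [bLoop]
  intro n
  induction n with
  | zero =>
    intro lines hlen
    have : lines = [] := List.eq_nil_of_length_eq_zero (Nat.le_zero.mp hlen)
    subst this; exact nil_case
  | succ n ih =>
    intro lines hlen
    cases lines with
    | nil => exact nil_case
    | cons l rest =>
      have hrest : rest.length ≤ n := by simp at hlen; omega
      constructor
      · intro acc
        by_cases h : bMatches l
        · have hstep : aStep (acc, []) l = (acc, flatP [stripL l]) := by
            simp [aStep, h, flatP, stripL, PySem.Str.toList_strip]
          rw [List.foldl_cons, hstep]
          rw [(ih rest hrest).2 acc [] (stripL l) (good_stripL l h) (by simp)]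
          rw [bLoop]
          simp only [h, if_pos]
          rw [join_eq]
          simp
        · have hstep : aStep (acc, []) l = (acc, []) := by simp [aStep, h]
          rw [List.foldl_cons, hstep, (ih rest hrest).1 acc]
          rw [bLoop]
          simp [h]
      · intro acc ps p hp hq
        by_cases h : bMatches l
        · have hstep : aStep (acc, flatP (p :: ps)) l = (acc, flatP (p :: (ps ++ [stripL l]))) := by
            have hfa := flat_append_singleton (p :: ps) (stripL l)
            simp only [List.cons_append, stripL] at hfa
            simp [aStep, h, PySem.Str.toList_strip, List.append_assoc, stripL, hfa]
          rw [List.foldl_cons, hstep]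
          rw [(ih rest hrest).2 acc (ps ++ [stripL l]) p hp ?_]
          · simp [h]
          · intro q hq'
            rcases List.mem_append.mp hq' with h' | h'
            · exact hq q h'
            · simp at h'; subst h'; exact good_stripL l h
        · have hne : flatP (p :: ps) ≠ [] := by rw [flat_eq]; simp
          have hstep : aStep (acc, flatP (p :: ps)) l =
              (acc ++ [String.ofList (interP (p :: ps))], []) := by
            simp [aStep, h, hne, strip_flat ps p hp hq]
          rw [List.foldl_cons, hstep, (ih rest hrest).1 _]
          rw [List.takeWhile_cons, List.dropWhile_cons]
          simp only [h, if_neg, Bool.false_eq_true, not_false_iff]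
          rw [bLoop]
          simp [h]

theorem step_fun_eq :
    (fun (st : List String × List Char) line =>
      if PROJECT_KEYWORDS.any (fun k => PySem.Str.isIn (PySem.Str.lower k) (PySem.Str.lower line)) then
        (st.1, st.2 ++ (PySem.Str.strip line).toList ++ [' '])
      else if st.2 ≠ [] then
        (st.1 ++ [String.ofList (PySem.Chars.strip st.2)], [])
      else st) = aStep := by
  funext st line
  rw [aStep, matches_eq]

theorem ports_agree (text : String) : extract_projects text = extract_projects_alt text := by
  show finishA (((PySem.Str.split? text "\n").getD []).foldl _ ([], [])) = _
  rw [step_fun_eq, extract_projects_alt]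
  exact (main_ind _ _ le_rfl).1 []

-- ===== VERDICT (by name: the statement is the Claim_ definition above) =====
theorem extract_projects_spec : Claim_equal_extract_projects := by
  intro text _
  exact ports_agree text
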